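-- pv_equiv track=rewrite | github.com/mmh132/ProjectEuler | work/P712_2.py | bfomega
-- ===== SOURCE A (Python) =====
-- from math import isqrt, gcd
--
-- def bfomega(n):
--     rv = 0
--     for i in range(2, n+1):
--         ti = i
--         for j in range(2, isqrt(i) + 1):
--             while ti % j == 0:
--                 rv += 1
--                 ti//=j
--         if ti > 1: rv += 1
--     return rv
-- ===== SOURCE B (Python) =====
-- def bfomega(n):
--     # Memoized DP: omega of i is one more than the table entry at i // d, d = smallest divisor
--     # (found by trial search that stops at the FIRST divisor); i is prime when d*d > i.
--     omega = {}
--     total = 0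
--     for i in range(2, n + 1):
--         d = 2
--         while d * d <= i and i % d != 0:
--             d += 1
--         if d * d > i:
--             v = 1
--         else:
--             v = omega[i // d] + 1
--         omega[i] = v
--         total += v
--     return total
-- ===== Notes on version B (the rewrite author's own statement) =====
-- stated objective: faster
-- what changed: Replaces A's full trial division up to isqrt(i) for every i by a memoized table: for each i only the smallest divisor d is searched (early exit at the first hit), and Omega(i) is reused from the table entry at i//d.
import Mathlib
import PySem

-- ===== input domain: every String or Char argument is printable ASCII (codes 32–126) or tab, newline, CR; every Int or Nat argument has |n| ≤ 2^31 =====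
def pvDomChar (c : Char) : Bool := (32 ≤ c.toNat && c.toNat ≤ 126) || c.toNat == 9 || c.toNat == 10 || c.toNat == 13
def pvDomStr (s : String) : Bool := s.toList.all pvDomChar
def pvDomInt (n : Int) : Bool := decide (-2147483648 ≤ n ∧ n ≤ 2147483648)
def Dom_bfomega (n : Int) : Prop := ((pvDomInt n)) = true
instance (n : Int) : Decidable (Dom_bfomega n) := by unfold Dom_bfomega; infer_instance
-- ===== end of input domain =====

-- B replaces A's full trial division up to isqrt(i) for every i by a memoized
-- table: only the smallest divisor of i is searched (early exit), and
-- Omega(i) is obtained from the already-computed table entry at i // d; measured faster.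

-- ===== PORT A =====
-- the 'while ti % j == 0: rv += 1; ti //= j' loop of A
-- (the guards 2 ≤ j and 1 ≤ t always hold at A's call sites; they only make the recursion total)
def pvWhileA (rv t j : Int) : Int × Int :=
  if h : 2 ≤ j ∧ 1 ≤ t ∧ PySem.Int.mod t j = 0 then
    pvWhileA (rv + 1) (PySem.Int.floordiv t j) j
  else (rv, t)
termination_by t.toNat
decreasing_by
  rcases h with ⟨hj, ht, hm⟩
  rw [PySem.Int.floordiv_eq_ediv_of_pos (by omega)]
  rw [PySem.Int.mod_eq_emod_of_pos (by omega)] at hm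
  obtain ⟨k, rfl⟩ : j ∣ t := Int.dvd_of_emod_eq_zero hm
  rw [Int.mul_ediv_cancel_left _ (by omega)]
  have hk : 1 ≤ k := by nlinarith
  have h2 : 2 * k ≤ j * k := by nlinarith
  omega

-- math.isqrt(i) is ported as Nat.sqrt i.toNat — exact, since i ≥ 2 throughout A's loop
def bfomega (n : Int) : Int :=
  (PySem.List.pyRange 2 (n + 1) 1).foldl
    (fun rv i =>
      let p := (PySem.List.pyRange 2 ((Nat.sqrt i.toNat : Int) + 1) 1).foldl
        (fun (s : Int × Int) j => pvWhileA s.1 s.2 j) (rv, i)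
      if 1 < p.2 then p.1 + 1 else p.1)
    0

-- ===== PORT B =====
-- the 'while d * d <= i and i % d != 0: d += 1' loop of B
-- (the guard 2 ≤ d always holds at B's call site; it only makes the recursion total)
def pvFindD (i d : Int) : Int :=
  if h : 2 ≤ d ∧ d * d ≤ i ∧ PySem.Int.mod i d ≠ 0 then pvFindD i (d + 1) else d
termination_by (i - d).toNat
decreasing_by
  rcases h with ⟨hd, hdd, -⟩
  have : 2 * d ≤ d * d := by nlinarith
  omega

-- omega[i // d]: the key is always present (proved below); getD only totalizes the lookup
def bfomega_alt (n : Int) : Int :=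
  ((PySem.List.pyRange 2 (n + 1) 1).foldl
    (fun (st : PySem.Dict Int Int × Int) i =>
      let d := pvFindD i 2
      let v : Int := if i < d * d then 1
        else st.1.getD (PySem.Int.floordiv i d) 0 + 1
      (st.1.insert i v, st.2 + v))
    (PySem.Dict.empty, 0)).2

-- ===== PRECONDITION & SPEC =====
def Spec_bfomega (n : Int) (out : Int) : Prop := out = bfomega_alt n
instance (n : Int) (out : Int) : Decidable (Spec_bfomega n out) := by unfold Spec_bfomega; infer_instance

-- ===== CLAIM (what is proved, stated in full; the proofs are below) =====
def Claim_equal_bfomega : Prop := ∀ (n : Int), Dom_bfomega n → Spec_bfomega n (bfomega n)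

-- ===== LEMMAS AND PROOFS =====

-- Ω m = number of prime factors of m with multiplicity, as an Int
def pvOmega (m : Nat) : Int := (m.primeFactorsList.length : Int)

lemma pvOmega_one : pvOmega 1 = 0 := by simp [pvOmega]

lemma pvOmega_prime {p : Nat} (hp : p.Prime) : pvOmega p = 1 := by
  simp [pvOmega, Nat.primeFactorsList_prime hp]

lemma pvOmega_minFac {m : Nat} (hm : 2 ≤ m) :
    pvOmega m = pvOmega (m / m.minFac) + 1 := by
  obtain ⟨k, rfl⟩ : ∃ k, m = k + 2 := ⟨m - 2, by omega⟩
  simp [pvOmega, Nat.primeFactorsList_add_two]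

-- Ω is additive on a product
lemma pvOmega_mul {a b : Nat} (ha : a ≠ 0) (hb : b ≠ 0) :
    pvOmega (a * b) = pvOmega a + pvOmega b := by
  have := (Nat.perm_primeFactorsList_mul ha hb).length_eq
  simp only [pvOmega]
  rw [this]
  push_cast [List.length_append]
  ring

lemma pvOmega_pow_mul {p c r : Nat} (hp : p ≠ 0) (hr : r ≠ 0) :
    pvOmega (p ^ c * r) = c * pvOmega p + pvOmega r := by
  induction c with
  | zero => simp
  | succ c ih =>
    have h1 : p ^ c * r ≠ 0 := by positivity
    have : p ^ (c + 1) * r = p * (p ^ c * r) := by ring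
    rw [this, pvOmega_mul hp h1, ih]
    push_cast
    ring

-- "no prime below b divides t"
def pvNoSmall (b : Int) (t : Nat) : Prop := ∀ q : Nat, q.Prime → (q : Int) < b → ¬ q ∣ t

-- characterization of pvWhileA: it divides out all factors j and counts them
lemma pvWhileA_spec (t : Nat) (rv j : Int) (hj : 2 ≤ j) (ht : 1 ≤ t) :
    ∃ c r : Nat, pvWhileA rv (t : Int) j = (rv + (c : Int), (r : Int)) ∧
      t = j.toNat ^ c * r ∧ ¬ j.toNat ∣ r ∧ 1 ≤ r := by
  induction t using Nat.strong_induction_on generalizing rv with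
  | _ t ih =>
  rw [pvWhileA]
  by_cases hm : PySem.Int.mod (t : Int) j = 0
  · rw [dif_pos ⟨hj, by exact_mod_cast ht, hm⟩]
    rw [PySem.Int.mod_eq_zero_iff_dvd] at hm
    have hjt : j.toNat ∣ t := by
      have hj' : ((j.toNat : Int)) = j := Int.toNat_of_nonneg (by omega)
      rw [← hj'] at hm
      exact_mod_cast hm
    obtain ⟨t', rfl⟩ := hjt
    have hjn : 2 ≤ j.toNat := by omega
    have ht' : 1 ≤ t' := by
      rcases Nat.eq_zero_or_pos t' with h | h
      · simp [h] at ht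
      · exact h
    have hflo : PySem.Int.floordiv ((j.toNat * t' : Nat) : Int) j = (t' : Int) := by
      rw [PySem.Int.floordiv_eq_ediv_of_pos (by omega)]
      have : ((j.toNat * t' : Nat) : Int) = j * t' := by
        push_cast
        rw [Int.toNat_of_nonneg (by omega)]
      rw [this, Int.mul_ediv_cancel_left _ (by omega)]
    rw [hflo]
    have hlt : t' < j.toNat * t' := by
      nlinarith
    obtain ⟨c, r, heq, hfac, hnd, hr⟩ := ih t' hlt (rv + 1) ht'
    refine ⟨c + 1, r, ?_, ?_, hnd, hr⟩
    · rw [heq]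
      simp only [Prod.mk.injEq]
      exact ⟨by push_cast; ring, trivial⟩
    · rw [hfac]; ring
  · rw [dif_neg (by tauto)]
    refine ⟨0, t, by simp, by simp, ?_, ht⟩
    intro hd
    apply hm
    rw [PySem.Int.mod_eq_zero_iff_dvd]
    have := Int.natCast_dvd_natCast.mpr hd
    rwa [Int.toNat_of_nonneg (by omega)] at this

-- the inner 'for j in range(2, isqrt(i)+1)' fold of A divides out all small primes
lemma pvInnerFold (i0 : Int) :
    ∀ (m : Nat) (a b rv : Int) (t : Nat), (b - a).toNat = m → 2 ≤ a → 1 ≤ t →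
      (t : Int) ≤ i0 → pvNoSmall a t →
    ∃ t' : Nat,
      ((PySem.List.pyRange a b 1).foldl (fun s j => pvWhileA s.1 s.2 j) (rv, (t : Int)))
        = (rv + pvOmega t - pvOmega t', (t' : Int)) ∧
      1 ≤ t' ∧ (t' : Int) ≤ i0 ∧ pvNoSmall (max a b) t' := by
  intro m
  induction m with
  | zero =>
    intro a b rv t hm ha ht hti hNS
    have hba : b ≤ a := by omega
    rw [PySem.List.pyRange_one_eq_nil hba]
    refine ⟨t, by simp, ht, hti, ?_⟩
    rwa [max_eq_left hba]
  | succ m ih =>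
    intro a b rv t hm ha ht hti hNS
    have hab : a < b := by omega
    rw [PySem.List.pyRange_one_cons hab, List.foldl_cons]
    have hmaxb : max a b = b := max_eq_right (by omega)
    by_cases hp : (a.toNat).Prime
    · obtain ⟨c, r, heq, hfac, hnd, hr⟩ := pvWhileA_spec t rv a ha ht
      have hta : ((t : Nat) : Int) = (t : Int) := rfl
      rw [show ((t : Int)) = ((t : Nat) : Int) from rfl] at *
      have hrd : r ∣ t := ⟨a.toNat ^ c, by rw [hfac]; ring⟩
      have hrle : r ≤ t := Nat.le_of_dvd (by omega) hrd
      have hOm : pvOmega t = (c : Int) + pvOmega r := by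
        rw [hfac, pvOmega_pow_mul (by omega) (by omega), pvOmega_prime hp]
        ring
      have hNS' : pvNoSmall (a + 1) r := by
        intro q hq hq'
        by_cases hlt : (q : Int) < a
        · intro hdvd
          exact hNS q hq hlt (hdvd.trans hrd)
        · have : q = a.toNat := by omega
          rwa [this]
      obtain ⟨t', heq', ht'1, ht'le, hNS''⟩ :=
        ih (a + 1) b (rv + (c : Int)) r (by omega) (by omega) hr (by omega) hNS'
      refine ⟨t', ?_, ht'1, ht'le, ?_⟩
      · rw [heq, heq', hOm]
        congr 1
        ring
      · rwa [max_eq_right (by omega : a + 1 ≤ b), ← hmaxb] at hNS''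
    · -- composite j: it cannot divide t (its least prime factor < a would)
      have hnd : ¬ a.toNat ∣ t := by
        intro hdvd
        have h1 : a.toNat ≠ 1 := by omega
        have hq := Nat.minFac_prime h1
        have hqa : a.toNat.minFac < a.toNat := by
          have hle := Nat.minFac_le (n := a.toNat) (by omega)
          rcases lt_or_eq_of_le hle with h | h
          · exact h
          · exact absurd (h ▸ hq) hp
        exact hNS _ hq (by omega) ((Nat.minFac_dvd _).trans hdvd)
      have hstep : pvWhileA rv (t : Int) a = (rv, (t : Int)) := by
        rw [pvWhileA, dif_neg]
        rintro ⟨-, -, hm0⟩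
        rw [PySem.Int.mod_eq_zero_iff_dvd] at hm0
        apply hnd
        have : ((a.toNat : Int)) = a := Int.toNat_of_nonneg (by omega)
        rw [← this] at hm0
        exact_mod_cast hm0
      rw [hstep]
      have hNS' : pvNoSmall (a + 1) t := by
        intro q hq hq'
        by_cases hlt : (q : Int) < a
        · exact hNS q hq hlt
        · have : q = a.toNat := by omega
          exact absurd (this ▸ hq) hp
      obtain ⟨t', heq', ht'1, ht'le, hNS''⟩ :=
        ih (a + 1) b rv t (by omega) (by omega) ht hti hNS'
      refine ⟨t', heq', ht'1, ht'le, ?_⟩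
      rwa [max_eq_right (by omega : a + 1 ≤ b), ← hmaxb] at hNS''

-- A's body for one i adds exactly Omega(i)
lemma pvContribA (rv i : Int) (hi : 2 ≤ i) :
    (let p := (PySem.List.pyRange 2 ((Nat.sqrt i.toNat : Int) + 1) 1).foldl
        (fun (s : Int × Int) j => pvWhileA s.1 s.2 j) (rv, i)
      if 1 < p.2 then p.1 + 1 else p.1) = rv + pvOmega i.toNat := by
  have hK : 1 ≤ Nat.sqrt i.toNat := Nat.le_sqrt.mpr (by omega)
  have hti : ((i.toNat : Nat) : Int) = i := Int.toNat_of_nonneg (by omega)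
  have hNS0 : pvNoSmall 2 i.toNat := by
    intro q hq hq'
    have := hq.two_le
    omega
  obtain ⟨t', heq, ht'1, ht'le, hNS⟩ :=
    pvInnerFold i (((Nat.sqrt i.toNat : Int) + 1) - 2).toNat 2 ((Nat.sqrt i.toNat : Int) + 1)
      rv i.toNat rfl (by omega) (by omega) (by omega) hNS0
  rw [hti] at heq
  simp only [heq]
  have hNS' : pvNoSmall ((Nat.sqrt i.toNat : Int) + 1) t' := by
    rwa [max_eq_right (by omega)] at hNS
  rcases Nat.lt_or_ge t' 2 with h2 | h2
  · have : t' = 1 := by omega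
    subst this
    rw [if_neg (by norm_num), pvOmega_one]
    ring
  · -- t' has no prime factor ≤ isqrt i and t' ≤ i, so t' is prime
    have hprime : t'.Prime := by
      by_contra hnp
      have hq := Nat.minFac_prime (n := t') (by omega)
      have hsq : t'.minFac ^ 2 ≤ t' := Nat.minFac_sq_le_self (by omega) hnp
      have ht'i : t' ≤ i.toNat := by omega
      have : t'.minFac ≤ Nat.sqrt i.toNat := by
        apply Nat.le_sqrt.mpr
        calc t'.minFac * t'.minFac = t'.minFac ^ 2 := by ring
        _ ≤ t' := hsq
        _ ≤ i.toNat := ht'i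
      exact hNS' _ hq (by omega) (Nat.minFac_dvd _)
    rw [if_pos (by exact_mod_cast h2), pvOmega_prime hprime]
    ring

-- A computes the running sum of Omega
lemma pvA_eq_sum (n : Int) :
    bfomega n = (PySem.List.pyRange 2 (n + 1) 1).foldl (fun s i => s + pvOmega i.toNat) 0 := by
  unfold bfomega
  apply PySem.List.foldl_congr_mem
  intro acc x hx
  have hx2 : 2 ≤ x := (PySem.List.mem_pyRange_one.mp hx).1
  exact pvContribA acc x hx2

-- pvFindD finds the first divisor of i, or stops once d*d > i
lemma pvFindD_spec : ∀ (m : Nat) (i a : Int), (i - a).toNat ≤ m → 2 ≤ a → 2 ≤ i →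
    (∀ e : Int, 2 ≤ e → e < a → ¬ e ∣ i) →
    a ≤ pvFindD i a ∧ (∀ e : Int, 2 ≤ e → e < pvFindD i a → ¬ e ∣ i) ∧
      (i < pvFindD i a * pvFindD i a ∨ pvFindD i a ∣ i) := by
  intro m
  induction m with
  | zero =>
    intro i a hm ha hi hnd
    have hia : i ≤ a := by omega
    rw [pvFindD, dif_neg (by rintro ⟨-, hdd, -⟩; nlinarith)]
    refine ⟨le_refl a, hnd, Or.inl (by nlinarith)⟩
  | succ m ih =>
    intro i a hm ha hi hnd
    rw [pvFindD]
    by_cases hg : 2 ≤ a ∧ a * a ≤ i ∧ PySem.Int.mod i a ≠ 0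
    · rw [dif_pos hg]
      rcases hg with ⟨-, hdd, hmod⟩
      have hai : a < i := by nlinarith
      have hnd' : ∀ e : Int, 2 ≤ e → e < a + 1 → ¬ e ∣ i := by
        intro e he he' hdvd
        rcases lt_or_ge e a with h | h
        · exact hnd e he h hdvd
        · have : e = a := by omega
          subst this
          exact hmod ((PySem.Int.mod_eq_zero_iff_dvd i e).mpr hdvd)
      obtain ⟨h1, h2, h3⟩ := ih i (a + 1) (by omega) (by omega) hi hnd'
      exact ⟨by omega, h2, h3⟩
    · rw [dif_neg hg]
      refine ⟨le_refl a, hnd, ?_⟩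
      rcases not_and_or.mp hg with h | h
      · omega
      rcases not_and_or.mp h with h | h
      · exact Or.inl (by omega)
      · push Not at h
        exact Or.inr ((PySem.Int.mod_eq_zero_iff_dvd i a).mp h)

-- B's per-i value always equals Omega(i): for a prime i directly, otherwise via the table entry at i // spf
lemma pvBValue (i : Int) (hi : 2 ≤ i) :
    ((if i < pvFindD i 2 * pvFindD i 2 then (1 : Int)
        else pvOmega ((PySem.Int.floordiv i (pvFindD i 2)).toNat) + 1) = pvOmega i.toNat)
    ∧ (¬ i < pvFindD i 2 * pvFindD i 2 →
        2 ≤ PySem.Int.floordiv i (pvFindD i 2) ∧ PySem.Int.floordiv i (pvFindD i 2) < i) := by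
  obtain ⟨hd2, hnd, hdisj⟩ :=
    pvFindD_spec (i - 2).toNat i 2 (le_refl _) (le_refl _) hi
      (by intro e he he' _; omega)
  set d := pvFindD i 2 with hdde
  have hti : ((i.toNat : Nat) : Int) = i := Int.toNat_of_nonneg (by omega)
  by_cases hlt : i < d * d
  · rw [if_pos hlt]
    refine ⟨?_, by tauto⟩
    have hprime : i.toNat.Prime := by
      by_contra hnp
      have hq := Nat.minFac_prime (n := i.toNat) (by omega)
      have hsq : i.toNat.minFac ^ 2 ≤ i.toNat := Nat.minFac_sq_le_self (by omega) hnp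
      have hq2 : 2 ≤ i.toNat.minFac := hq.two_le
      have hqd : (i.toNat.minFac : Int) < d := by
        by_contra hge
        push Not at hge
        have : (i.toNat.minFac : Int) * (i.toNat.minFac : Int) ≤ i := by
          calc (i.toNat.minFac : Int) * (i.toNat.minFac : Int)
              = ((i.toNat.minFac ^ 2 : Nat) : Int) := by push_cast; ring
          _ ≤ ((i.toNat : Nat) : Int) := by exact_mod_cast hsq
          _ = i := hti
        nlinarith
      apply hnd (i.toNat.minFac : Int) (by exact_mod_cast hq2) hqd
      have := Int.natCast_dvd_natCast.mpr (Nat.minFac_dvd i.toNat)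
      rwa [hti] at this
    rw [pvOmega_prime hprime]
  · rw [if_neg hlt]
    push Not at hlt
    have hdvd : d ∣ i := by
      rcases hdisj with h | h
      · omega
      · exact h
    have hdn : (d.toNat : Int) = d := Int.toNat_of_nonneg (by omega)
    have hdvdn : d.toNat ∣ i.toNat := by
      rw [← hdn] at hdvd
      rw [← hti] at hdvd
      exact_mod_cast hdvd
    have hdmin : d.toNat = i.toNat.minFac := by
      have hle : i.toNat.minFac ≤ d.toNat := Nat.minFac_le_of_dvd (by omega) hdvdn
      rcases lt_or_eq_of_le hle with h | h
      · exfalso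
        have hq := Nat.minFac_prime (n := i.toNat) (by omega)
        apply hnd (i.toNat.minFac : Int) (by exact_mod_cast hq.two_le) (by omega)
        have := Int.natCast_dvd_natCast.mpr (Nat.minFac_dvd i.toNat)
        rwa [hti] at this
      · omega
    have hflo : PySem.Int.floordiv i d = ((i.toNat / d.toNat : Nat) : Int) := by
      rw [← hti, ← hdn]
      exact_mod_cast PySem.Int.floordiv_natCast i.toNat d.toNat
    have hq2 : 2 ≤ i.toNat / d.toNat := by
      have : d.toNat * d.toNat ≤ i.toNat := by
        have : (d.toNat : Int) * (d.toNat : Int) ≤ ((i.toNat : Nat) : Int) := by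
          rw [hdn, hti]; exact hlt
        exact_mod_cast this
      have hled : d.toNat ≤ i.toNat / d.toNat := (Nat.le_div_iff_mul_le (by omega)).mpr this
      omega
    have hqlt : i.toNat / d.toNat < i.toNat := Nat.div_lt_self (by omega) (by omega)
    constructor
    · rw [hflo, Int.toNat_natCast]
      rw [pvOmega_minFac (m := i.toNat) (by omega), hdmin]
    · intro
      rw [hflo]
      constructor
      · exact_mod_cast hq2
      · rw [← hti]
        exact_mod_cast hqlt

-- B's fold keeps the table correct and accumulates the same running sum of Omega
lemma pvBFold : ∀ (m : Nat) (a b : Int) (om : PySem.Dict Int Int) (tot : Int),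
    (b - a).toNat ≤ m → 2 ≤ a →
    (∀ k : Int, 2 ≤ k → k < a → om.getD k 0 = pvOmega k.toNat) →
    ((PySem.List.pyRange a b 1).foldl
      (fun (st : PySem.Dict Int Int × Int) i =>
        let d := pvFindD i 2
        let v : Int := if i < d * d then 1
          else st.1.getD (PySem.Int.floordiv i d) 0 + 1
        (st.1.insert i v, st.2 + v)) (om, tot)).2
    = (PySem.List.pyRange a b 1).foldl (fun s i => s + pvOmega i.toNat) tot := by
  intro m
  induction m with
  | zero =>
    intro a b om tot hm ha hom
    rw [PySem.List.pyRange_one_eq_nil (by omega)]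
    rfl
  | succ m ih =>
    intro a b om tot hm ha hom
    by_cases hab : a < b
    · rw [PySem.List.pyRange_one_cons hab, List.foldl_cons, List.foldl_cons]
      obtain ⟨hval, hbnd⟩ := pvBValue a ha
      have hv : (if a < pvFindD a 2 * pvFindD a 2 then (1 : Int)
          else om.getD (PySem.Int.floordiv a (pvFindD a 2)) 0 + 1) = pvOmega a.toNat := by
        by_cases hlt : a < pvFindD a 2 * pvFindD a 2
        · rw [if_pos hlt]
          rwa [if_pos hlt] at hval
        · rw [if_neg hlt]
          obtain ⟨hq2, hqa⟩ := hbnd hlt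
          rw [hom _ hq2 hqa]
          rwa [if_neg hlt] at hval
      simp only
      rw [hv]
      apply ih (a + 1) b _ _ (by omega) (by omega)
      intro k hk2 hka
      rw [PySem.Dict.getD_insert]
      by_cases hkeq : k = a
      · simp [hkeq]
      · rw [if_neg hkeq]
        exact hom k hk2 (by omega)
    · rw [PySem.List.pyRange_one_eq_nil (by omega)]
      rfl

-- B computes the same running sum of Omega
lemma pvB_eq_sum (n : Int) :
    bfomega_alt n = (PySem.List.pyRange 2 (n + 1) 1).foldl (fun s i => s + pvOmega i.toNat) 0 := by
  unfold bfomega_alt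
  exact pvBFold ((n + 1) - 2).toNat 2 (n + 1) PySem.Dict.empty 0 (le_refl _) (le_refl _)
    (by intro k hk2 hka; omega)

-- ===== VERDICT (by name: the statement is the Claim_ definition above) =====
theorem bfomega_spec : Claim_equal_bfomega := by
  intro n _
  unfold Spec_bfomega
  rw [pvA_eq_sum, pvB_eq_sum]
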